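-- pv_equiv track=rewrite | github.com/Air2air/z-beam-generator | components/badgesymbol/generator.py | _infer_material_type
-- ===== SOURCE A (Python) =====
-- from typing import Any, Dict, Optional
--
-- def _infer_material_type(material_name: str, frontmatter_data: Dict) -> str:
--     """Infer material type from name and available data"""
--     name_lower = material_name.lower()
--
--     # Check category from frontmatter first
--     category = frontmatter_data.get("category", "").lower()
--     if category:
--         return category
--
--     # Infer from material name
--     if any(metal in name_lower for metal in ["aluminum", "steel", "iron", "copper", "brass", "bronze", "titanium", "gold", "silver", "lead", "zinc", "nickel", "cobalt", "tungsten", "chromium", "manganese", "beryllium", "magnesium", "palladium", "platinum", "gallium", "hafnium", "indium", "iridium", "molybdenum", "niobium", "rhenium", "rhodium", "ruthenium", "tantalum", "tin", "vanadium", "zirconium"]):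
--         return "metal"
--     elif "glass" in name_lower:
--         return "glass"
--     elif any(ceramic in name_lower for ceramic in ["ceramic", "alumina", "zirconia", "porcelain", "stoneware"]):
--         return "ceramic"
--     elif any(wood in name_lower for wood in ["wood", "oak", "pine", "birch", "cedar", "maple", "ash", "beech", "cherry", "fir", "hickory", "mahogany", "poplar", "redwood", "rosewood", "teak", "walnut", "willow", "bamboo", "mdf", "plywood"]):
--         return "wood"
--     elif any(stone in name_lower for stone in ["stone", "granite", "marble", "limestone", "sandstone", "slate", "basalt", "quartzite", "onyx", "travertine", "alabaster", "calcite", "schist", "serpentine", "soapstone", "bluestone", "breccia", "porphyry", "shale"]):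
--         return "stone"
--     elif "concrete" in name_lower or "cement" in name_lower or "mortar" in name_lower or "brick" in name_lower or "plaster" in name_lower or "stucco" in name_lower or "terracotta" in name_lower:
--         return "construction"
--     elif "polymer" in name_lower or "plastic" in name_lower or any(poly in name_lower for poly in ["polyethylene", "polypropylene", "polystyrene", "polyvinyl", "polycarbonate", "polytetrafluoroethylene"]):
--         return "polymer"
--     elif "composite" in name_lower or "fiber" in name_lower or "resin" in name_lower:
--         return "composite"
--     elif "carbide" in name_lower:
--         return "carbide"
--     elif "semiconductor" in name_lower or "silicon" in name_lower:
--         return "semiconductor"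
--     elif "rubber" in name_lower or "elastomer" in name_lower:
--         return "elastomer"
--     else:
--         return "material"
-- ===== SOURCE B (Python) =====
-- _TABLE = [
--     ("metal", ["aluminum", "steel", "iron", "copper", "brass", "bronze", "titanium", "gold", "silver", "lead", "zinc", "nickel", "cobalt", "tungsten", "chromium", "manganese", "beryllium", "magnesium", "palladium", "platinum", "gallium", "hafnium", "indium", "iridium", "molybdenum", "niobium", "rhenium", "rhodium", "ruthenium", "tantalum", "tin", "vanadium", "zirconium"]),
--     ("glass", ["glass"]),
--     ("ceramic", ["ceramic", "alumina", "zirconia", "porcelain", "stoneware"]),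
--     ("wood", ["wood", "oak", "pine", "birch", "cedar", "maple", "ash", "beech", "cherry", "fir", "hickory", "mahogany", "poplar", "redwood", "rosewood", "teak", "walnut", "willow", "bamboo", "mdf", "plywood"]),
--     ("stone", ["stone", "granite", "marble", "limestone", "sandstone", "slate", "basalt", "quartzite", "onyx", "travertine", "alabaster", "calcite", "schist", "serpentine", "soapstone", "bluestone", "breccia", "porphyry", "shale"]),
--     ("construction", ["concrete", "cement", "mortar", "brick", "plaster", "stucco", "terracotta"]),
--     ("polymer", ["polymer", "plastic", "polyethylene", "polypropylene", "polystyrene", "polyvinyl", "polycarbonate", "polytetrafluoroethylene"]),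
--     ("composite", ["composite", "fiber", "resin"]),
--     ("carbide", ["carbide"]),
--     ("semiconductor", ["semiconductor", "silicon"]),
--     ("elastomer", ["rubber", "elastomer"]),
-- ]
--
-- _CATEGORIES = [cat for cat, _ in _TABLE]
--
-- # inverted index: keyword -> priority (index of its category; first occurrence wins)
-- _KW_PRI = {}
-- for _i, (_cat, _kws) in enumerate(_TABLE):
--     for _kw in _kws:
--         if _kw not in _KW_PRI:
--             _KW_PRI[_kw] = _i
--
-- _LENGTHS = sorted({len(_kw) for _kw in _KW_PRI})
--
--
-- def _infer_material_type(material_name: str, frontmatter_data: dict) -> str: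
--     name_lower = material_name.lower()
--     category = frontmatter_data.get("category", "").lower()
--     if category:
--         return category
--     n = len(name_lower)
--     best = len(_CATEGORIES)
--     for i in range(n):
--         for L in _LENGTHS:
--             if i + L <= n:
--                 p = _KW_PRI.get(name_lower[i:i + L])
--                 if p is not None and p < best:
--                     best = p
--     if best < len(_CATEGORIES):
--         return _CATEGORIES[best]
--     return "material"
-- ===== Notes on version B (the rewrite author's own statement) =====
-- stated objective: alternative
-- what changed: B replaces A's chain of per-keyword 'kw in name' substring tests by an inverted index: a keyword->priority dict built once, the name's substrings (every start position, distinct keyword lengths only) looked up in it, keeping the minimum priority; the answer is the category at that priority.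
import Mathlib
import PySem

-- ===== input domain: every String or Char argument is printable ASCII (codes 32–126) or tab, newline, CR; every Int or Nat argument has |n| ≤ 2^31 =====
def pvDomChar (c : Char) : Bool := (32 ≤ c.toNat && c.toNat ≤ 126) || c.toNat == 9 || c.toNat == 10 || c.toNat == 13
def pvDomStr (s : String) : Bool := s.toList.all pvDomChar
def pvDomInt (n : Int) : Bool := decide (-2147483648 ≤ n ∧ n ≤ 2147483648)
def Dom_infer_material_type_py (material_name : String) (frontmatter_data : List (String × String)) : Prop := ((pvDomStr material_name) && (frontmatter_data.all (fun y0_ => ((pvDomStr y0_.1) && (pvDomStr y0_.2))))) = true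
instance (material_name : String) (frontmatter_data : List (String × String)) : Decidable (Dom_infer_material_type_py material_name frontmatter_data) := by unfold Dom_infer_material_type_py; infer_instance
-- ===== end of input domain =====

-- B replaces A's per-keyword membership chain by an inverted index (keyword -> priority dict) driven by enumerating the substrings of the name and keeping the minimum priority (objective: alternative).


-- ===== PORT A =====
def infer_material_type_py (material_name : String) (frontmatter_data : List (String × String)) : String :=
  let name_lower := PySem.Str.lower material_name
  let category := PySem.Str.lower ((PySem.Dict.mk frontmatter_data).getD "category" "")
  if category ≠ "" then category
  else if (["aluminum", "steel", "iron", "copper", "brass", "bronze", "titanium", "gold", "silver", "lead", "zinc", "nickel", "cobalt", "tungsten", "chromium", "manganese", "beryllium", "magnesium", "palladium", "platinum", "gallium", "hafnium", "indium", "iridium", "molybdenum", "niobium", "rhenium", "rhodium", "ruthenium", "tantalum", "tin", "vanadium", "zirconium"]).any (fun m => PySem.Str.isIn m name_lower) then "metal"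
  else if PySem.Str.isIn "glass" name_lower then "glass"
  else if (["ceramic", "alumina", "zirconia", "porcelain", "stoneware"]).any (fun c => PySem.Str.isIn c name_lower) then "ceramic"
  else if (["wood", "oak", "pine", "birch", "cedar", "maple", "ash", "beech", "cherry", "fir", "hickory", "mahogany", "poplar", "redwood", "rosewood", "teak", "walnut", "willow", "bamboo", "mdf", "plywood"]).any (fun w => PySem.Str.isIn w name_lower) then "wood"
  else if (["stone", "granite", "marble", "limestone", "sandstone", "slate", "basalt", "quartzite", "onyx", "travertine", "alabaster", "calcite", "schist", "serpentine", "soapstone", "bluestone", "breccia", "porphyry", "shale"]).any (fun s => PySem.Str.isIn s name_lower) then "stone"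
  else if PySem.Str.isIn "concrete" name_lower || PySem.Str.isIn "cement" name_lower || PySem.Str.isIn "mortar" name_lower || PySem.Str.isIn "brick" name_lower || PySem.Str.isIn "plaster" name_lower || PySem.Str.isIn "stucco" name_lower || PySem.Str.isIn "terracotta" name_lower then "construction"
  else if PySem.Str.isIn "polymer" name_lower || PySem.Str.isIn "plastic" name_lower || (["polyethylene", "polypropylene", "polystyrene", "polyvinyl", "polycarbonate", "polytetrafluoroethylene"]).any (fun p => PySem.Str.isIn p name_lower) then "polymer"
  else if PySem.Str.isIn "composite" name_lower || PySem.Str.isIn "fiber" name_lower || PySem.Str.isIn "resin" name_lower then "composite"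
  else if PySem.Str.isIn "carbide" name_lower then "carbide"
  else if PySem.Str.isIn "semiconductor" name_lower || PySem.Str.isIn "silicon" name_lower then "semiconductor"
  else if PySem.Str.isIn "rubber" name_lower || PySem.Str.isIn "elastomer" name_lower then "elastomer"
  else "material"

-- ===== PORT B =====
-- _TABLE: the ordered (category, keywords) data of Source B
def pvTable : List (String × List String) :=
  [("metal", ["aluminum", "steel", "iron", "copper", "brass", "bronze", "titanium", "gold", "silver", "lead", "zinc", "nickel", "cobalt", "tungsten", "chromium", "manganese", "beryllium", "magnesium", "palladium", "platinum", "gallium", "hafnium", "indium", "iridium", "molybdenum", "niobium", "rhenium", "rhodium", "ruthenium", "tantalum", "tin", "vanadium", "zirconium"]),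
   ("glass", ["glass"]),
   ("ceramic", ["ceramic", "alumina", "zirconia", "porcelain", "stoneware"]),
   ("wood", ["wood", "oak", "pine", "birch", "cedar", "maple", "ash", "beech", "cherry", "fir", "hickory", "mahogany", "poplar", "redwood", "rosewood", "teak", "walnut", "willow", "bamboo", "mdf", "plywood"]),
   ("stone", ["stone", "granite", "marble", "limestone", "sandstone", "slate", "basalt", "quartzite", "onyx", "travertine", "alabaster", "calcite", "schist", "serpentine", "soapstone", "bluestone", "breccia", "porphyry", "shale"]),
   ("construction", ["concrete", "cement", "mortar", "brick", "plaster", "stucco", "terracotta"]),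
   ("polymer", ["polymer", "plastic", "polyethylene", "polypropylene", "polystyrene", "polyvinyl", "polycarbonate", "polytetrafluoroethylene"]),
   ("composite", ["composite", "fiber", "resin"]),
   ("carbide", ["carbide"]),
   ("semiconductor", ["semiconductor", "silicon"]),
   ("elastomer", ["rubber", "elastomer"])]

-- _CATEGORIES = [cat for cat, _ in _TABLE]
def pvCategories : List String := pvTable.map (fun p => p.1)

-- _KW_PRI: inverted index keyword -> priority (category index; first occurrence wins)
def pvKwPri : PySem.Dict String Int :=
  (PySem.List.enumerate pvTable 0).foldl
    (fun d ik => ik.2.2.foldl (fun d kw => if d.contains kw then d else d.insert kw ik.1) d)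
    PySem.Dict.empty

-- _LENGTHS = sorted({len(kw) for kw in _KW_PRI})
def pvLengths : List Int :=
  PySem.List.sorted (PySem.Set.ofList (pvKwPri.keys.map (fun k => (PySem.Str.len k : Int)))) (fun x => x) false

def infer_material_type_py_alt (material_name : String) (frontmatter_data : List (String × String)) : String :=
  let name_lower := PySem.Str.lower material_name
  let category := PySem.Str.lower ((PySem.Dict.mk frontmatter_data).getD "category" "")
  if category ≠ "" then category
  else
    let n : Int := PySem.Str.len name_lower
    let best : Int :=
      (PySem.List.pyRange 0 n 1).foldl
        (fun b i =>
          pvLengths.foldl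
            (fun b L =>
              if i + L ≤ n then
                match pvKwPri.get? (PySem.Str.slice name_lower (some i) (some (i + L))) with
                | some p => if p < b then p else b
                | none => b
              else b)
            b)
        ((pvCategories.length : Int))
    if best < (pvCategories.length : Int) then PySem.List.pyGetD pvCategories best ""
    else "material"

-- ===== PRECONDITION & SPEC =====
def Spec_infer_material_type_py (material_name : String) (frontmatter_data : List (String × String)) (out : String) : Prop := out = infer_material_type_py_alt material_name frontmatter_data
instance (material_name : String) (frontmatter_data : List (String × String)) (out : String) : Decidable (Spec_infer_material_type_py material_name frontmatter_data out) := by unfold Spec_infer_material_type_py; infer_instance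

-- ===== CLAIM (what is proved, stated in full; the proofs are below) =====
def Claim_equal_infer_material_type_py : Prop := ∀ (material_name : String) (frontmatter_data : List (String × String)), Dom_infer_material_type_py material_name frontmatter_data → Spec_infer_material_type_py material_name frontmatter_data (infer_material_type_py material_name frontmatter_data)

-- ===== LEMMAS AND PROOFS =====

-- proof-side view of the inverted index: the (keyword, priority) pairs in build order
def pvEntries : List (String × Int) :=
  (PySem.List.enumerate pvTable 0).flatMap (fun ik => ik.2.2.map (fun kw => (kw, ik.1)))

-- keyword list of category k
def pvKws (k : Nat) : List String := ((pvTable[k]?).getD ("", [])).2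

-- "some keyword of category k occurs in s"
def pvHit (s : String) (k : Nat) : Bool := (pvKws k).any (fun kw => PySem.Str.isIn kw s)

-- the candidate generator of B's scan: position/length pair -> dict hit
def pvG (s : String) (c : Int × Int) : Option Int :=
  if c.1 + c.2 ≤ PySem.Str.len s then
    pvKwPri.get? (PySem.Str.slice s (some c.1) (some (c.1 + c.2)))
  else none

-- one min-update step of B's loop
def pvStep {α : Type} (g : α → Option Int) (b : Int) (x : α) : Int :=
  match g x with | some p => if p < b then p else b | none => b

-- all (position, length) candidates B's nested loop visits
def pvCand (s : String) : List (Int × Int) :=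
  (PySem.List.pyRange 0 (PySem.Str.len s) 1).flatMap (fun i => pvLengths.map (fun L => (i, L)))

-- "keyword kw with priority p occurs in s"
def pvFoundE (s : String) (p : Int) : Prop :=
  ∃ kw, (kw, p) ∈ pvEntries ∧ PySem.Str.isIn kw s = true

-- B's loop, named (definitionally the term inside infer_material_type_py_alt)
def pvLoop (s : String) : Int :=
  (PySem.List.pyRange 0 (PySem.Str.len s) 1).foldl
    (fun b i =>
      pvLengths.foldl
        (fun b L =>
          if i + L ≤ PySem.Str.len s then
            match pvKwPri.get? (PySem.Str.slice s (some i) (some (i + L))) with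
            | some p => if p < b then p else b
            | none => b
          else b)
        b)
    11

-- closed facts about the data (kernel-checked)
set_option maxRecDepth 20000 in
theorem pvItems_eq : pvKwPri.items = pvEntries := by decide
set_option maxRecDepth 20000 in
theorem pvNodup : pvKwPri.keys.Nodup := by decide
set_option maxRecDepth 20000 in
theorem pvLengths_pos : ∀ L ∈ pvLengths, 1 ≤ L := by decide
set_option maxRecDepth 20000 in
theorem pvEntries_len : ∀ e ∈ pvEntries, 1 ≤ e.1.toList.length ∧ ((e.1.toList.length : Int) ∈ pvLengths) := by decide
set_option maxRecDepth 20000 in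
theorem pvEntries_val : ∀ e ∈ pvEntries,
    (e.2 = 0 ∧ e.1 ∈ pvKws 0) ∨ (e.2 = 1 ∧ e.1 ∈ pvKws 1) ∨ (e.2 = 2 ∧ e.1 ∈ pvKws 2) ∨
    (e.2 = 3 ∧ e.1 ∈ pvKws 3) ∨ (e.2 = 4 ∧ e.1 ∈ pvKws 4) ∨ (e.2 = 5 ∧ e.1 ∈ pvKws 5) ∨
    (e.2 = 6 ∧ e.1 ∈ pvKws 6) ∨ (e.2 = 7 ∧ e.1 ∈ pvKws 7) ∨ (e.2 = 8 ∧ e.1 ∈ pvKws 8) ∨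
    (e.2 = 9 ∧ e.1 ∈ pvKws 9) ∨ (e.2 = 10 ∧ e.1 ∈ pvKws 10) := by decide
set_option maxRecDepth 20000 in
theorem pvKws_mem : ∀ k : Nat, k < 11 → ∀ kw ∈ pvKws k, (kw, (k : Int)) ∈ pvEntries := by decide

-- a nested foldl is the foldl over the pair list
theorem pvFoldlNest {α β γ : Type} (f : γ → α × β → γ) (xs : List α) (ys : List β) (b : γ) :
    xs.foldl (fun b i => ys.foldl (fun b y => f b (i, y)) b) b
      = (xs.flatMap (fun i => ys.map (fun y => (i, y)))).foldl f b := by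
  induction xs generalizing b with
  | nil => rfl
  | cons x xs ih => simp [List.foldl_append, List.foldl_map, ih]

-- the min-update fold computes the minimum of the produced values (with the seed)
theorem pvFoldMin {α : Type} (g : α → Option Int) (xs : List α) (b : Int) :
    xs.foldl (pvStep g) b ≤ b
    ∧ (xs.foldl (pvStep g) b = b ∨ ∃ x ∈ xs, g x = some (xs.foldl (pvStep g) b))
    ∧ (∀ x ∈ xs, ∀ p, g x = some p → xs.foldl (pvStep g) b ≤ p) := by
  induction xs generalizing b with
  | nil => simp
  | cons x xs ih =>
    have hstep : pvStep g b x ≤ b ∧ (pvStep g b x = b ∨ g x = some (pvStep g b x))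
        ∧ (∀ p, g x = some p → pvStep g b x ≤ p) := by
      unfold pvStep
      cases hg : g x with
      | none => simp
      | some p =>
        by_cases h : p < b <;> simp [h] <;> omega
    obtain ⟨h1, h2, h3⟩ := ih (pvStep g b x)
    refine ⟨le_trans h1 hstep.1, ?_, ?_⟩
    · rcases h2 with h | ⟨y, hy, hgy⟩
      · rcases hstep.2.1 with h' | h'
        · exact Or.inl (by rw [List.foldl_cons, h, h'])
        · exact Or.inr ⟨x, by simp, by rw [List.foldl_cons, h]; exact h'⟩
      · exact Or.inr ⟨y, List.mem_cons_of_mem _ hy, by simpa using hgy⟩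
    · intro z hz p hp
      rcases List.mem_cons.mp hz with rfl | hz'
      · exact le_trans h1 (hstep.2.2 p hp)
      · exact h3 z hz' p hp

-- B's scan finds priority p iff some keyword of priority p occurs in s
theorem pvFound_iff (s : String) (p : Int) :
    (∃ c ∈ pvCand s, pvG s c = some p) ↔ pvFoundE s p := by
  constructor
  · rintro ⟨c, hc, hg⟩
    simp only [pvCand, List.mem_flatMap, List.mem_map, PySem.List.mem_pyRange_one] at hc
    obtain ⟨i, ⟨hi0, hin⟩, L, hL', heq⟩ := hc
    subst heq
    rw [pvG] at hg
    simp only at hg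
    split_ifs at hg with hcond
    have hiL : (0 : Int) ≤ i + L := by have := pvLengths_pos L hL'; omega
    have hmem : (PySem.Str.slice s (some i) (some (i + L)), p) ∈ pvEntries := by
      rw [← pvItems_eq]
      exact PySem.Dict.mem_items_of_get?_eq_some pvKwPri hg
    refine ⟨_, hmem, ?_⟩
    rw [PySem.Str.isIn_eq]
    apply (PySem.Chars.exists_prefix_drop_iff_isIn _ _).mp
    refine ⟨i.toNat, ?_⟩
    have hsl : (PySem.Str.slice s (some i) (some (i + L))).toList
        = (s.toList.drop i.toNat).take ((i + L).toNat - i.toNat) := by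
      simp only [PySem.Str.toList_slice, PySem.Chars.slice_eq_listSlice]
      exact PySem.List.slice_toNat _ hi0 hiL
    rw [hsl]
    exact List.take_prefix _ _
  · rintro ⟨kw, hE, hIn⟩
    have hkw1 : 1 ≤ kw.toList.length := by simpa using (pvEntries_len (kw, p) hE).1
    have hkwL : ((kw.toList.length : Int) ∈ pvLengths) := by simpa using (pvEntries_len (kw, p) hE).2
    rw [PySem.Str.isIn_eq] at hIn
    obtain ⟨j, hpref⟩ := (PySem.Chars.exists_prefix_drop_iff_isIn _ _).mpr hIn
    have hdl : kw.toList.length ≤ s.toList.length - j := by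
      simpa using hpref.length_le
    have hjb : j + kw.toList.length ≤ s.toList.length := by omega
    have hlen : PySem.Str.len s = (s.toList.length : Int) := by simp [pysem]
    refine ⟨((j : Int), (kw.toList.length : Int)), ?_, ?_⟩
    · simp only [pvCand, List.mem_flatMap, List.mem_map, PySem.List.mem_pyRange_one]
      refine ⟨(j : Int), ⟨by omega, ?_⟩, (kw.toList.length : Int), hkwL, rfl⟩
      rw [hlen]
      have : j < s.toList.length := by omega
      exact_mod_cast this
    · rw [pvG]
      have hcond : (j : Int) + (kw.toList.length : Int) ≤ PySem.Str.len s := by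
        rw [hlen]; exact_mod_cast hjb
      rw [if_pos hcond]
      have hslice : PySem.Str.slice s (some (j : Int)) (some ((j : Int) + (kw.toList.length : Int))) = kw := by
        apply String.toList_inj.mp
        have : (PySem.Str.slice s (some (j : Int)) (some ((j : Int) + (kw.toList.length : Int)))).toList
            = (s.toList.drop j).take kw.toList.length := by
          simp only [PySem.Str.toList_slice, PySem.Chars.slice_eq_listSlice]
          exact PySem.List.slice_natCast_add _ _ _
        rw [this]
        exact (List.prefix_iff_eq_take.mp hpref).symm
      rw [hslice]
      exact PySem.Dict.get?_of_mem_items pvKwPri (by rw [pvItems_eq]; exact hE) pvNodup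

-- found priorities are exactly the hit categories
theorem pvFoundE_iff (s : String) (p : Int) :
    pvFoundE s p ↔ ∃ k : Nat, k < 11 ∧ p = (k : Int) ∧ pvHit s k = true := by
  constructor
  · rintro ⟨kw, hE, hIn⟩
    have h := pvEntries_val (kw, p) hE
    rcases h with ⟨h1, h2⟩ | ⟨h1, h2⟩ | ⟨h1, h2⟩ | ⟨h1, h2⟩ | ⟨h1, h2⟩ | ⟨h1, h2⟩ | ⟨h1, h2⟩ | ⟨h1, h2⟩ | ⟨h1, h2⟩ | ⟨h1, h2⟩ | ⟨h1, h2⟩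
    · exact ⟨0, by omega, by exact_mod_cast h1, List.any_eq_true.mpr ⟨kw, h2, hIn⟩⟩
    · exact ⟨1, by omega, by exact_mod_cast h1, List.any_eq_true.mpr ⟨kw, h2, hIn⟩⟩
    · exact ⟨2, by omega, by exact_mod_cast h1, List.any_eq_true.mpr ⟨kw, h2, hIn⟩⟩
    · exact ⟨3, by omega, by exact_mod_cast h1, List.any_eq_true.mpr ⟨kw, h2, hIn⟩⟩
    · exact ⟨4, by omega, by exact_mod_cast h1, List.any_eq_true.mpr ⟨kw, h2, hIn⟩⟩
    · exact ⟨5, by omega, by exact_mod_cast h1, List.any_eq_true.mpr ⟨kw, h2, hIn⟩⟩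
    · exact ⟨6, by omega, by exact_mod_cast h1, List.any_eq_true.mpr ⟨kw, h2, hIn⟩⟩
    · exact ⟨7, by omega, by exact_mod_cast h1, List.any_eq_true.mpr ⟨kw, h2, hIn⟩⟩
    · exact ⟨8, by omega, by exact_mod_cast h1, List.any_eq_true.mpr ⟨kw, h2, hIn⟩⟩
    · exact ⟨9, by omega, by exact_mod_cast h1, List.any_eq_true.mpr ⟨kw, h2, hIn⟩⟩
    · exact ⟨10, by omega, by exact_mod_cast h1, List.any_eq_true.mpr ⟨kw, h2, hIn⟩⟩
  · rintro ⟨k, hk, rfl, hhit⟩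
    obtain ⟨kw, hmem, hIn⟩ := List.any_eq_true.mp hhit
    exact ⟨kw, pvKws_mem k hk kw hmem, hIn⟩

-- the two facts the final case analysis needs about B's loop
theorem pvLoop_spec (s : String) :
    (∀ k : Nat, k < 11 → pvHit s k = true → pvLoop s ≤ (k : Int))
    ∧ (pvLoop s = 11 ∨ ∃ k : Nat, k < 11 ∧ pvLoop s = (k : Int) ∧ pvHit s k = true) := by
  have hEq : pvLoop s = (pvCand s).foldl (pvStep (pvG s)) 11 := by
    unfold pvLoop pvCand
    rw [← pvFoldlNest]
    apply List.foldl_ext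
    intro b i hi
    apply List.foldl_ext
    intro b' L hL
    simp only [pvStep, pvG]
    by_cases h : i + L ≤ PySem.Str.len s
    · rw [if_pos h, if_pos h]
    · rw [if_neg h, if_neg h]
  obtain ⟨hle, hor, hall⟩ := pvFoldMin (pvG s) (pvCand s) 11
  constructor
  · intro k hk hhit
    have hF : pvFoundE s (k : Int) := (pvFoundE_iff s _).mpr ⟨k, hk, rfl, hhit⟩
    obtain ⟨c, hcmem, hgc⟩ := (pvFound_iff s _).mpr hF
    rw [hEq]
    exact hall c hcmem _ hgc
  · rcases hor with h | ⟨c, hcmem, hgc⟩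
    · exact Or.inl (by rw [hEq, h])
    · right
      have hF : pvFoundE s ((pvCand s).foldl (pvStep (pvG s)) 11) := (pvFound_iff s _).mp ⟨c, hcmem, hgc⟩
      obtain ⟨k, hk, hpe, hhit⟩ := (pvFoundE_iff s _).mp hF
      exact ⟨k, hk, by rw [hEq, hpe], hhit⟩

-- the loop settles on the first hit category
theorem pvPick (s : String) (k : Nat) (hk : k < 11)
    (hprev : ∀ j : Nat, j < k → pvHit s j = false) (hhit : pvHit s k = true) :
    pvLoop s = (k : Int) := by
  obtain ⟨hub, hlb⟩ := pvLoop_spec s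
  have h1 : pvLoop s ≤ (k : Int) := hub k hk hhit
  rcases hlb with h | ⟨k', hk', hkeq, hh⟩
  · omega
  · by_cases hc : k' < k
    · rw [hprev k' hc] at hh
      exact absurd hh (by simp)
    · omega

theorem pvNone (s : String) (hall : ∀ j : Nat, j < 11 → pvHit s j = false) : pvLoop s = 11 := by
  obtain ⟨hub, hlb⟩ := pvLoop_spec s
  rcases hlb with h | ⟨k', hk', hkeq, hh⟩
  · exact h
  · rw [hall k' hk'] at hh
    exact absurd hh (by simp)

-- the elif chain over the hit flags equals indexing by the loop's minimum
set_option maxHeartbeats 2000000 in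
theorem pvMain (s : String) :
    (if pvHit s 0 then "metal"
     else if pvHit s 1 then "glass"
     else if pvHit s 2 then "ceramic"
     else if pvHit s 3 then "wood"
     else if pvHit s 4 then "stone"
     else if pvHit s 5 then "construction"
     else if pvHit s 6 then "polymer"
     else if pvHit s 7 then "composite"
     else if pvHit s 8 then "carbide"
     else if pvHit s 9 then "semiconductor"
     else if pvHit s 10 then "elastomer"
     else "material")
    = (if pvLoop s < ((pvCategories.length : Nat) : Int) then PySem.List.pyGetD pvCategories (pvLoop s) ""
       else "material") := by
  by_cases h0 : pvHit s 0 = true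
  · rw [if_pos h0, pvPick s 0 (by omega) (by intro j hj; omega) h0]; decide
  · rw [if_neg h0]
    replace h0 : pvHit s 0 = false := by simpa using h0
    by_cases h1 : pvHit s 1 = true
    · rw [if_pos h1, pvPick s 1 (by omega) (by intro j hj; interval_cases j; assumption) h1]; decide
    · rw [if_neg h1]
      replace h1 : pvHit s 1 = false := by simpa using h1
      by_cases h2 : pvHit s 2 = true
      · rw [if_pos h2, pvPick s 2 (by omega) (by intro j hj; interval_cases j <;> assumption) h2]; decide
      · rw [if_neg h2]
        replace h2 : pvHit s 2 = false := by simpa using h2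
        by_cases h3 : pvHit s 3 = true
        · rw [if_pos h3, pvPick s 3 (by omega) (by intro j hj; interval_cases j <;> assumption) h3]; decide
        · rw [if_neg h3]
          replace h3 : pvHit s 3 = false := by simpa using h3
          by_cases h4 : pvHit s 4 = true
          · rw [if_pos h4, pvPick s 4 (by omega) (by intro j hj; interval_cases j <;> assumption) h4]; decide
          · rw [if_neg h4]
            replace h4 : pvHit s 4 = false := by simpa using h4
            by_cases h5 : pvHit s 5 = true
            · rw [if_pos h5, pvPick s 5 (by omega) (by intro j hj; interval_cases j <;> assumption) h5]; decide
            · rw [if_neg h5]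
              replace h5 : pvHit s 5 = false := by simpa using h5
              by_cases h6 : pvHit s 6 = true
              · rw [if_pos h6, pvPick s 6 (by omega) (by intro j hj; interval_cases j <;> assumption) h6]; decide
              · rw [if_neg h6]
                replace h6 : pvHit s 6 = false := by simpa using h6
                by_cases h7 : pvHit s 7 = true
                · rw [if_pos h7, pvPick s 7 (by omega) (by intro j hj; interval_cases j <;> assumption) h7]; decide
                · rw [if_neg h7]
                  replace h7 : pvHit s 7 = false := by simpa using h7
                  by_cases h8 : pvHit s 8 = true
                  · rw [if_pos h8, pvPick s 8 (by omega) (by intro j hj; interval_cases j <;> assumption) h8]; decide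
                  · rw [if_neg h8]
                    replace h8 : pvHit s 8 = false := by simpa using h8
                    by_cases h9 : pvHit s 9 = true
                    · rw [if_pos h9, pvPick s 9 (by omega) (by intro j hj; interval_cases j <;> assumption) h9]; decide
                    · rw [if_neg h9]
                      replace h9 : pvHit s 9 = false := by simpa using h9
                      by_cases h10 : pvHit s 10 = true
                      · rw [if_pos h10, pvPick s 10 (by omega) (by intro j hj; interval_cases j <;> assumption) h10]; decide
                      · rw [if_neg h10]
                        replace h10 : pvHit s 10 = false := by simpa using h10
                        rw [pvNone s (by intro j hj; interval_cases j <;> assumption)]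
                        decide

-- ===== VERDICT (by name: the statement is the Claim_ definition above) =====
theorem infer_material_type_py_spec : Claim_equal_infer_material_type_py := by
  intro material_name frontmatter_data _
  unfold Spec_infer_material_type_py infer_material_type_py infer_material_type_py_alt
  by_cases hc : PySem.Str.lower ((PySem.Dict.mk frontmatter_data).getD "category" "") = ""
  · simp only [hc, ne_eq, not_true_eq_false, if_false]
    have e0 : (["aluminum", "steel", "iron", "copper", "brass", "bronze", "titanium", "gold", "silver", "lead", "zinc", "nickel", "cobalt", "tungsten", "chromium", "manganese", "beryllium", "magnesium", "palladium", "platinum", "gallium", "hafnium", "indium", "iridium", "molybdenum", "niobium", "rhenium", "rhodium", "ruthenium", "tantalum", "tin", "vanadium", "zirconium"]).any (fun m => PySem.Str.isIn m (PySem.Str.lower material_name)) = pvHit (PySem.Str.lower material_name) 0 := rfl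
    have hk1 : pvKws 1 = ["glass"] := rfl
    have hk5 : pvKws 5 = ["concrete", "cement", "mortar", "brick", "plaster", "stucco", "terracotta"] := rfl
    have hk6 : pvKws 6 = ["polymer", "plastic", "polyethylene", "polypropylene", "polystyrene", "polyvinyl", "polycarbonate", "polytetrafluoroethylene"] := rfl
    have hk7 : pvKws 7 = ["composite", "fiber", "resin"] := rfl
    have hk8 : pvKws 8 = ["carbide"] := rfl
    have hk9 : pvKws 9 = ["semiconductor", "silicon"] := rfl
    have hk10 : pvKws 10 = ["rubber", "elastomer"] := rfl
    have e1 : PySem.Str.isIn "glass" (PySem.Str.lower material_name) = pvHit (PySem.Str.lower material_name) 1 := by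
      rw [pvHit, hk1]; simp
    have e2 : (["ceramic", "alumina", "zirconia", "porcelain", "stoneware"]).any (fun c => PySem.Str.isIn c (PySem.Str.lower material_name)) = pvHit (PySem.Str.lower material_name) 2 := rfl
    have e3 : (["wood", "oak", "pine", "birch", "cedar", "maple", "ash", "beech", "cherry", "fir", "hickory", "mahogany", "poplar", "redwood", "rosewood", "teak", "walnut", "willow", "bamboo", "mdf", "plywood"]).any (fun w => PySem.Str.isIn w (PySem.Str.lower material_name)) = pvHit (PySem.Str.lower material_name) 3 := rfl
    have e4 : (["stone", "granite", "marble", "limestone", "sandstone", "slate", "basalt", "quartzite", "onyx", "travertine", "alabaster", "calcite", "schist", "serpentine", "soapstone", "bluestone", "breccia", "porphyry", "shale"]).any (fun st => PySem.Str.isIn st (PySem.Str.lower material_name)) = pvHit (PySem.Str.lower material_name) 4 := rfl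
    have e5 : (PySem.Str.isIn "concrete" (PySem.Str.lower material_name) || PySem.Str.isIn "cement" (PySem.Str.lower material_name) || PySem.Str.isIn "mortar" (PySem.Str.lower material_name) || PySem.Str.isIn "brick" (PySem.Str.lower material_name) || PySem.Str.isIn "plaster" (PySem.Str.lower material_name) || PySem.Str.isIn "stucco" (PySem.Str.lower material_name) || PySem.Str.isIn "terracotta" (PySem.Str.lower material_name)) = pvHit (PySem.Str.lower material_name) 5 := by
      rw [pvHit, hk5]; simp [Bool.or_assoc]
    have e6 : (PySem.Str.isIn "polymer" (PySem.Str.lower material_name) || PySem.Str.isIn "plastic" (PySem.Str.lower material_name) || (["polyethylene", "polypropylene", "polystyrene", "polyvinyl", "polycarbonate", "polytetrafluoroethylene"]).any (fun pp => PySem.Str.isIn pp (PySem.Str.lower material_name))) = pvHit (PySem.Str.lower material_name) 6 := by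
      rw [pvHit, hk6]; simp [Bool.or_assoc]
    have e7 : (PySem.Str.isIn "composite" (PySem.Str.lower material_name) || PySem.Str.isIn "fiber" (PySem.Str.lower material_name) || PySem.Str.isIn "resin" (PySem.Str.lower material_name)) = pvHit (PySem.Str.lower material_name) 7 := by
      rw [pvHit, hk7]; simp [Bool.or_assoc]
    have e8 : PySem.Str.isIn "carbide" (PySem.Str.lower material_name) = pvHit (PySem.Str.lower material_name) 8 := by
      rw [pvHit, hk8]; simp
    have e9 : (PySem.Str.isIn "semiconductor" (PySem.Str.lower material_name) || PySem.Str.isIn "silicon" (PySem.Str.lower material_name)) = pvHit (PySem.Str.lower material_name) 9 := by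
      rw [pvHit, hk9]; simp
    have e10 : (PySem.Str.isIn "rubber" (PySem.Str.lower material_name) || PySem.Str.isIn "elastomer" (PySem.Str.lower material_name)) = pvHit (PySem.Str.lower material_name) 10 := by
      rw [pvHit, hk10]; simp
    rw [e0, e1, e2, e3, e4, e5, e6, e7, e8, e9, e10]
    exact pvMain (PySem.Str.lower material_name)
  · rw [if_pos hc, if_pos hc]
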